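-- pv_equiv track=rewrite | github.com/ClubComputacionCuantica/sudoku-nisq-benchmark | src/sudoku_nisq/q_sudoku.py | canonicalize_puzzle
-- ===== SOURCE A (Python) =====
-- def canonicalize_puzzle(matrix: list[list[int]]) -> list[list[int]]:
--     """Relabels digits in a Sudoku matrix to ensure canonical form up to permutation.
--
--     The function creates a standardized representation of a Sudoku puzzle by relabeling
--     the non-zero digits sequentially as they appear, while preserving the relative
--     relationships between numbers. This ensures that puzzles that are equivalent up to
--     digit permutation will have the same canonical form.
--
--     Args:
--         matrix (list[list[int]]): A nxn Sudoku matrix where 0 represents empty cells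
--             and 1-n represent filled cells.
--
--     Returns:
--         list[list[int]]: A canonicalized version of the input matrix where numbers are
--             relabeled according to their first appearance.
--
--     Example:
--         Input matrix with numbers [2,5,7] would be canonicalized to [1,2,3]
--         maintaining their relative positions but using sequential numbering.
--
--     Args:
--         matrix (list of list of int): Sudoku board matrix.
--
--     Returns:
--         list of list of int: Canonicalized board matrix.
--     """
--     mapping = {}  # Maps original numbers to their canonical form
--     current = 1   # Next available canonical number
--     canonical = []
--
--     for row in matrix:
--         new_row = []
--         for val in row:
--             if val == 0:
--                 new_row.append(0)  # Preserve empty cells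
--             else:
--                 if val not in mapping:
--                     # First time seeing this number, assign next sequential value
--                     mapping[val] = current
--                     current += 1
--                 new_row.append(mapping[val])
--         canonical.append(new_row)
--
--     return canonical
-- ===== SOURCE B (Python) =====
-- def canonicalize_puzzle(matrix: list[list[int]]) -> list[list[int]]:
--     """Rank-based canonicalization without any relabel table: the canonical
--     label of a nonzero value v is 1 + the number of distinct values that
--     appear before v's first occurrence in the flattened board."""
--     flat = [v for row in matrix for v in row if v != 0]
--     return [[0 if v == 0 else len(set(flat[:flat.index(v)])) + 1 for v in row]
--             for row in matrix]
-- ===== Notes on version B (the rewrite author's own statement) =====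
-- stated objective: alternative
-- what changed: B builds no relabel table at all: it computes each nonzero cell's canonical label directly as a rank, 1 + the number of distinct values in the flattened board before that value's first occurrence, instead of A's single pass that grows a mapping dict while emitting cells.
import Mathlib
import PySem

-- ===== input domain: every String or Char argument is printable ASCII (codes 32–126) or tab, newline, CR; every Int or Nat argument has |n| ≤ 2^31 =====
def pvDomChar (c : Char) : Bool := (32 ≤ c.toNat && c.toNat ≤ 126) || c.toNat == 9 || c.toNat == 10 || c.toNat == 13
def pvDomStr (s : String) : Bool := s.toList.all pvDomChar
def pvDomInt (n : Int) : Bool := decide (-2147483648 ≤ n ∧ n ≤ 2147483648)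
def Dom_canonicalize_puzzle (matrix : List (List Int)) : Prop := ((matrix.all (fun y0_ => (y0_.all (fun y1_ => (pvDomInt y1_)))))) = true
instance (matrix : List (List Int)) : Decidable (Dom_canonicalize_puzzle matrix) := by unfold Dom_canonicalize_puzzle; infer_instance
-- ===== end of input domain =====

-- B builds no relabel table: each nonzero cell's label is computed directly as a
-- rank (1 + distinct values before its first occurrence), instead of A's dict pass.


-- ===== PORT A =====
-- loop body for 'for val in row' (state: mapping, current, new_row)
def aCellStep (s : PySem.Dict Int Int × Int × List Int) (val : Int) :
    PySem.Dict Int Int × Int × List Int :=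
  if val = 0 then (s.1, s.2.1, s.2.2 ++ [0])
  else
    -- 'if val not in mapping: mapping[val]=current; current += 1'
    let m := if s.1.contains val then s.1 else s.1.insert val s.2.1
    let c := if s.1.contains val then s.2.1 else s.2.1 + 1
    -- mapping[val] cannot raise here: val is present after the insert, so getD's default is never read
    (m, c, s.2.2 ++ [m.getD val 0])

-- loop body for 'for row in matrix' (state: mapping, current, canonical)
def aRowStep (st : PySem.Dict Int Int × Int × List (List Int)) (row : List Int) :
    PySem.Dict Int Int × Int × List (List Int) :=
  let inner := row.foldl aCellStep (st.1, st.2.1, ([] : List Int))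
  (inner.1, inner.2.1, st.2.2 ++ [inner.2.2])

def canonicalize_puzzle (matrix : List (List Int)) : List (List Int) :=
  (matrix.foldl aRowStep (PySem.Dict.empty, 1, [])).2.2

-- ===== PORT B =====
def canonicalize_puzzle_alt (matrix : List (List Int)) : List (List Int) :=
  -- flat = [v for row in matrix for v in row if v != 0]
  let flat := matrix.flatMap (fun row => row.filter (fun v => v != 0))
  -- [[0 if v == 0 else len(set(flat[:flat.index(v)])) + 1 for v in row] for row in matrix]
  matrix.map (fun row => row.map (fun v =>
    if v = 0 then 0
    else match PySem.List.index? flat v with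
      | some i => ((PySem.Set.ofList (PySem.List.slice flat none (some (i : Int)))).length : Int) + 1
      | none => 0))  -- flat.index would raise ValueError; unreachable: every nonzero v is in flat

-- ===== PRECONDITION & SPEC =====
def Spec_canonicalize_puzzle (matrix : List (List Int)) (out : List (List Int)) : Prop := out = canonicalize_puzzle_alt matrix
instance (matrix : List (List Int)) (out : List (List Int)) : Decidable (Spec_canonicalize_puzzle matrix out) := by unfold Spec_canonicalize_puzzle; infer_instance

-- ===== CLAIM (what is proved, stated in full; the proofs are below) =====
def Claim_equal_canonicalize_puzzle : Prop := ∀ (matrix : List (List Int)), Dom_canonicalize_puzzle matrix → Spec_canonicalize_puzzle matrix (canonicalize_puzzle matrix)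

-- ===== LEMMAS AND PROOFS =====

-- the canonical value of a cell, relative to the full first-appearance list O
def cellMap (O : List Int) (v : Int) : Int :=
  if v = 0 then 0 else ((List.idxOf v O : Nat) : Int) + 1

-- invariant tying A's dict to the list 'seen' of distinct values seen so far
def PInv (seen : List Int) (m : PySem.Dict Int Int) : Prop :=
  (∀ v, m.contains v = decide (v ∈ seen)) ∧
  (∀ v ∈ seen, m.getD v 0 = ((List.idxOf v seen : Nat) : Int) + 1)

lemma idxOf_prefix {seen O : List Int} (h : seen <+: O) {v : Int} (hv : v ∈ seen) :
    List.idxOf v O = List.idxOf v seen := by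
  obtain ⟨t, rfl⟩ := h
  simp [List.idxOf_append, hv]

lemma seen_prefix_update (seen : List Int) (xs : List Int) :
    seen <+: PySem.Set.update seen xs :=
  ⟨_, (PySem.Set.update_eq_append_filter seen xs).symm⟩

lemma inner_lemma (O row : List Int) :
    ∀ (seen : List Int) (m : PySem.Dict Int Int) (acc : List Int),
      PInv seen m → seen.Nodup →
      PySem.Set.update seen (row.filter (fun v => v != 0)) <+: O →
      ∃ m', row.foldl aCellStep (m, ((seen.length : Nat) : Int) + 1, acc)
          = (m', (((PySem.Set.update seen (row.filter (fun v => v != 0))).length : Nat) : Int) + 1,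
             acc ++ row.map (cellMap O))
        ∧ PInv (PySem.Set.update seen (row.filter (fun v => v != 0))) m' := by
  induction row with
  | nil => intro seen m acc hP _ _; exact ⟨m, by simp [PySem.Set.update], hP⟩
  | cons v rest ih =>
    intro seen m acc hP hnd hpre
    by_cases hv0 : v = 0
    · subst hv0
      have hfil : List.filter (fun v => v != 0) (0 :: rest) = rest.filter (fun v => v != 0) := by simp
      rw [hfil] at hpre
      obtain ⟨m', heq, hP'⟩ := ih seen m (acc ++ [0]) hP hnd hpre
      refine ⟨m', ?_, by simpa [hfil] using hP'⟩
      simp only [List.foldl_cons, aCellStep, if_true]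
      rw [heq]
      simp [hfil, cellMap]
    · have hfil : List.filter (fun v => v != 0) (v :: rest)
          = v :: rest.filter (fun v => v != 0) := by simp [hv0]
      rw [hfil] at hpre
      rw [PySem.Set.update_cons] at hpre
      by_cases hmem : v ∈ seen
      · have hadd : PySem.Set.add seen v = seen := by
          simp [PySem.Set.add, PySem.Set.contains, hmem]
        rw [hadd] at hpre
        have hc : m.contains v = true := by rw [hP.1]; simp [hmem]
        have hstep : aCellStep (m, ((seen.length : Nat) : Int) + 1, acc) v
            = (m, ((seen.length : Nat) : Int) + 1, acc ++ [m.getD v 0]) := by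
          simp [aCellStep, hv0, hc]
        have hseenpre : seen <+: O :=
          (seen_prefix_update seen (rest.filter (fun v => v != 0))).trans hpre
        have hval : m.getD v 0 = cellMap O v := by
          rw [hP.2 v hmem, cellMap, if_neg hv0, idxOf_prefix hseenpre hmem]
        obtain ⟨m', heq, hP'⟩ := ih seen m (acc ++ [m.getD v 0]) hP hnd hpre
        refine ⟨m', ?_, ?_⟩
        · simp only [List.foldl_cons, hstep]
          rw [heq]
          simp [hfil, PySem.Set.update_cons, hadd, hval]
        · simpa [hfil, PySem.Set.update_cons, hadd] using hP'
      · have hc : m.contains v = false := by rw [hP.1]; simp [hmem]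
        have hadd : PySem.Set.add seen v = seen ++ [v] := by
          simp [PySem.Set.add, PySem.Set.contains, hmem]
        have hnd' : (seen ++ [v]).Nodup := by
          rw [← hadd]; exact PySem.Set.nodup_add seen v hnd
        set m2 := m.insert v (((seen.length : Nat) : Int) + 1) with hm2
        have hstep : aCellStep (m, ((seen.length : Nat) : Int) + 1, acc) v
            = (m2, ((seen.length : Nat) : Int) + 1 + 1, acc ++ [m2.getD v 0]) := by
          simp [aCellStep, hv0, hc, hm2]
        have hgv : m2.getD v 0 = ((seen.length : Nat) : Int) + 1 := by
          rw [hm2, PySem.Dict.getD_insert_self]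
        have hP2 : PInv (seen ++ [v]) m2 := by
          constructor
          · intro w
            rw [hm2, PySem.Dict.contains_insert, hP.1]
            by_cases hw : w = v <;> simp [hw, hmem]
          · intro w hw
            rcases List.mem_append.mp hw with hws | hwv
            · have hwne : w ≠ v := fun h => hmem (h ▸ hws)
              rw [hm2, PySem.Dict.getD_insert, if_neg hwne, hP.2 w hws,
                List.idxOf_append, if_pos hws]
            · have : w = v := by simpa using hwv
              subst this
              rw [hgv, List.idxOf_append, if_neg hmem]
              simp
        rw [hadd] at hpre
        obtain ⟨m', heq, hP'⟩ := ih (seen ++ [v]) m2 (acc ++ [m2.getD v 0]) hP2 hnd' hpre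
        have hsp2 : (seen ++ [v]) <+: O :=
          (seen_prefix_update (seen ++ [v]) (rest.filter (fun v => v != 0))).trans hpre
        have hvmem2 : v ∈ seen ++ [v] := by simp
        have hval : m2.getD v 0 = cellMap O v := by
          rw [hgv, cellMap, if_neg hv0, idxOf_prefix hsp2 hvmem2,
            List.idxOf_append, if_neg hmem]
          simp
        refine ⟨m', ?_, ?_⟩
        · simp only [List.foldl_cons, hstep]
          have hlen : ((seen.length : Nat) : Int) + 1 + 1
              = (((seen ++ [v]).length : Nat) : Int) + 1 := by
            simp
          rw [hlen, heq]
          simp [hfil, PySem.Set.update_cons, hadd, hval]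
        · simpa [hfil, PySem.Set.update_cons, hadd] using hP'

lemma outer_lemma (O : List Int) (rows : List (List Int)) :
    ∀ (seen : List Int) (m : PySem.Dict Int Int) (acc : List (List Int)),
      PInv seen m → seen.Nodup →
      PySem.Set.update seen (rows.flatMap (fun row => row.filter (fun v => v != 0))) <+: O →
      (rows.foldl aRowStep (m, ((seen.length : Nat) : Int) + 1, acc)).2.2
        = acc ++ rows.map (fun row => row.map (cellMap O)) := by
  induction rows with
  | nil => intro seen m acc _ _ _; simp
  | cons row rest ih =>
    intro seen m acc hP hnd hpre
    have hflat : (row :: rest).flatMap (fun row => row.filter (fun v => v != 0))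
        = row.filter (fun v => v != 0) ++ rest.flatMap (fun row => row.filter (fun v => v != 0)) := by
      simp
    rw [hflat, PySem.Set.update_append] at hpre
    have hrowpre : PySem.Set.update seen (row.filter (fun v => v != 0)) <+: O :=
      (seen_prefix_update _ _).trans hpre
    obtain ⟨m', heq, hP'⟩ := inner_lemma O row seen m [] hP hnd hrowpre
    have hnd' : (PySem.Set.update seen (row.filter (fun v => v != 0))).Nodup :=
      PySem.Set.nodup_update _ _ hnd
    simp only [List.foldl_cons, aRowStep]
    rw [heq]
    simp only [List.nil_append]
    rw [ih _ m' (acc ++ [row.map (cellMap O)]) hP' hnd' hpre]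
    simp

-- A computes exactly the cellwise map through the full first-appearance list
lemma a_eq_cellMap (matrix : List (List Int)) :
    canonicalize_puzzle matrix
      = matrix.map (fun row => row.map
          (cellMap (PySem.List.dedup (matrix.flatMap (fun row => row.filter (fun v => v != 0)))))) := by
  have hP : PInv [] PySem.Dict.empty := by
    constructor
    · intro v; simp [PySem.Dict.contains, PySem.Dict.empty]
    · intro v hv; simp at hv
  have hpre : PySem.Set.update [] (matrix.flatMap (fun row => row.filter (fun v => v != 0)))
      <+: PySem.List.dedup (matrix.flatMap (fun row => row.filter (fun v => v != 0))) := by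
    rw [PySem.Set.update_nil_left, PySem.List.dedup_eq_ofList]
  have := outer_lemma (PySem.List.dedup (matrix.flatMap (fun row => row.filter (fun v => v != 0))))
    matrix [] PySem.Dict.empty [] hP List.nodup_nil hpre
  simpa [canonicalize_puzzle] using this

-- rank characterisation: the index of v in the first-appearance dedup equals the
-- number of distinct values among the elements strictly before v's first occurrence
lemma idxOf_update_eq_len_update_take (v : Int) :
    ∀ (L seen : List Int), v ∉ seen → v ∈ L →
      List.idxOf v (PySem.Set.update seen L)
        = (PySem.Set.update seen (L.take (L.idxOf v))).length := by
  intro L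
  induction L with
  | nil => intro seen _ hv; simp at hv
  | cons x t ih =>
    intro seen hvs hvL
    by_cases hx : x = v
    · subst hx
      rw [List.idxOf_cons_self]
      simp only [List.take_zero]
      rw [PySem.Set.update_cons]
      have hadd : PySem.Set.add seen x = seen ++ [x] := by
        simp [PySem.Set.add, PySem.Set.contains, hvs]
      rw [hadd, PySem.Set.update_eq_append_filter, List.append_assoc,
        List.idxOf_append, if_neg hvs]
      simp [PySem.Set.update]
    · have hvt : v ∈ t := by
        rcases List.mem_cons.mp hvL with h1 | h1
        · exact absurd h1.symm hx
        · exact h1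
      have hidx : List.idxOf v (x :: t) = List.idxOf v t + 1 := by
        have hb : (x == v) = false := by simp [hx]
        rw [List.idxOf_cons, hb]
        rfl
      rw [hidx, List.take_succ_cons]
      have hvs' : v ∉ PySem.Set.add seen x := by
        intro h
        rcases (PySem.Set.mem_add seen x v).mp h with h1 | h2
        · exact hvs h1
        · exact hx h2.symm
      exact ih (PySem.Set.add seen x) hvs' hvt

-- v ∈ l makes list.index return exactly idxOf (first occurrence)
lemma myIdx {v : Int} : ∀ {l : List Int}, v ∈ l → List.idxOf? v l = some (List.idxOf v l) := by
  intro l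
  induction l with
  | nil => intro h; simp at h
  | cons x t ih =>
    intro h
    by_cases hx : x = v
    · subst hx; simp [List.idxOf?, List.findIdx?_cons]
    · have hvt : v ∈ t := by
        rcases List.mem_cons.mp h with h1 | h1
        · exact absurd h1.symm hx
        · exact h1
      have ht := ih hvt
      rw [List.idxOf?] at ht
      simp [List.idxOf?, List.findIdx?_cons, hx, ht]

-- B also computes the cellwise map through the full first-appearance list
lemma b_eq_cellMap (matrix : List (List Int)) :
    canonicalize_puzzle_alt matrix
      = matrix.map (fun row => row.map
          (cellMap (PySem.List.dedup (matrix.flatMap (fun row => row.filter (fun v => v != 0)))))) := by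
  set flat := matrix.flatMap (fun row => row.filter (fun v => v != 0)) with hflat
  rw [show canonicalize_puzzle_alt matrix
      = matrix.map (fun row => row.map (fun v =>
          if v = 0 then 0
          else match PySem.List.index? flat v with
            | some i => ((PySem.Set.ofList (PySem.List.slice flat none (some (i : Int)))).length : Int) + 1
            | none => 0)) from rfl]
  apply List.map_congr_left
  intro row hrow
  apply List.map_congr_left
  intro v hv
  by_cases hv0 : v = 0
  · simp [hv0, cellMap]
  · have hvflat : v ∈ flat := by
      rw [hflat]
      exact List.mem_flatMap.mpr ⟨row, hrow, List.mem_filter.mpr ⟨hv, by simp [hv0]⟩⟩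
    have hidx : PySem.List.index? flat v = some (List.idxOf v flat) := by
      rw [PySem.List.index?_eq_idxOf?]
      exact myIdx hvflat
    rw [if_neg hv0, hidx]
    simp only [PySem.List.slice_to_natCast]
    have hkey := idxOf_update_eq_len_update_take v flat [] (by simp) hvflat
    rw [PySem.Set.update_nil_left, PySem.Set.update_nil_left] at hkey
    rw [← hkey]
    simp [cellMap, hv0, PySem.List.dedup_eq_ofList]

-- ===== VERDICT (by name: the statement is the Claim_ definition above) =====
theorem canonicalize_puzzle_spec : Claim_equal_canonicalize_puzzle := by
  intro matrix _
  unfold Spec_canonicalize_puzzle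
  rw [a_eq_cellMap, b_eq_cellMap]
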